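-- pv_equiv track=rewrite | github.com/mill3na/Implementacao-TLB | main.py | codifica_paridade_2msb4
-- ===== SOURCE A (Python) =====
-- def codifica_paridade_2msb4(palavra):
--     """Formato | E | PARIDADE EVEN (MSB) | PARIDADE ODD (MSB-1) | RESTO DOS DADOS |
--         PARIDADE EVEN é calculada com bits 1 e 3
--         PARIDADE ODD é calculada com bits 2 e 4
--         E é o flag que indica se uma falha foi inserida nessa palavra
--     """
--     word = '{:033b}'.format(
--         palavra & 0x0ffffffff)  # põe a palavra como 33 bits em binario {string}, deixo o bit 0 em 0 (flag de erro)
--     # calcula paridade dos bits 1 e 3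
--     sum = 0
--     for i in range(29, len(word)):
--         if (i % 2 != 0):
--             sum = sum + int(word[i])
--     p_even = sum % 2
--     # calcula paridade dos bits 2 e 4
--     sum = 0
--     for i in range(29, len(word)):
--         if (i % 2 == 0):
--             sum = sum + int(word[i])
--     p_odd = sum % 2
--     word = muda_bit(word, 1, p_even)
--
--     return muda_bit(word, 2, p_odd)
--
-- def muda_bit(palavra, posicao, valor):
--     """modifica o valor de um bit na posição de uma palavra. A palavra é um número binário representado por uma string
--     Arguments:
--       palavra -- binário representado em uma string
--       posicao {int} -- posicao do bit que vai ser mudado, lembrando que o bit 0 é o MSB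
--       valor {int} -- valor 1 ou valor 0
--     Returns:
--       [string] -- retorna um binário representado em string
--     """
--     string_list = list(palavra)
--     if (valor == 1):
--         string_list[posicao] = '1'
--     else:
--         string_list[posicao] = '0'
--     return "".join(string_list)
-- ===== SOURCE B (Python) =====
-- def codifica_paridade_2msb4(palavra):
--     """Same format, computed with integer bit arithmetic instead of string-list loops."""
--     v = palavra & 0xffffffff
--     p_even = ((v >> 3) ^ (v >> 1)) & 1   # bits 3 and 1 (string indices 29, 31)
--     p_odd = ((v >> 2) ^ v) & 1           # bits 2 and 0 (string indices 30, 32)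
--     r = (v & 0x3fffffff) | (p_even << 31) | (p_odd << 30)
--     return '{:033b}'.format(r)
-- ===== Notes on version B (the rewrite author's own statement) =====
-- stated objective: simpler
-- what changed: Replaces the two index loops over the 33-char binary string and the list-mutation helper muda_bit by pure integer bit arithmetic (parities via shift/xor/and, bits 31/30 set via mask and or), formatting to binary once at the end.
import Mathlib
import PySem

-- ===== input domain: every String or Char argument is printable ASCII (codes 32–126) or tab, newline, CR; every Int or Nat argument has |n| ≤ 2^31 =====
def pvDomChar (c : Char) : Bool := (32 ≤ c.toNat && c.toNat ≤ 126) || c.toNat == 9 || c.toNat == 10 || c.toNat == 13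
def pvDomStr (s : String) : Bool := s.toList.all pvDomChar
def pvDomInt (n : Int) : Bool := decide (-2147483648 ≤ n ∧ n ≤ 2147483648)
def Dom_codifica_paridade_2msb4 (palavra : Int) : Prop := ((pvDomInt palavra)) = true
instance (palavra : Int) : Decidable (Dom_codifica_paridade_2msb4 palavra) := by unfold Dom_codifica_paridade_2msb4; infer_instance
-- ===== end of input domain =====

-- B replaces A's two index loops over a binary string and the list-mutation helper by pure
-- integer bit arithmetic, formatting once at the end (objective: simpler).

-- shared port of the Python builtin '{:033b}'.format(n): exact for 0 ≤ n < 2^33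
-- (the binary digit at string index i of a 33-char zero-padded binary literal is bit (32-i))
def fmt33 (v : Nat) : String :=
  String.ofList ((List.range 33).map (fun i => if v.testBit (32 - i) then '1' else '0'))

-- ===== PORT A =====
-- port of muda_bit: list(palavra); string_list[posicao] = '1'/'0'; "".join — List.set is exact
-- here because posicao (1 or 2) is always in range of the 33-char string
def muda_bit (palavra : String) (posicao : Nat) (valor : Nat) : String :=
  String.ofList (palavra.toList.set posicao (if valor = 1 then '1' else '0'))

def codifica_paridade_2msb4 (palavra : Int) : String :=
  -- palavra & 0x0ffffffff is nonnegative, so .toNat is exact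
  let v : Nat := (PySem.Int.band palavra 0xffffffff).toNat
  let word := fmt33 v
  -- int(word[i]) on a '0'/'1' character; indices 29..32 are in range of the 33-char string
  let sum1 : Nat := (PySem.List.pyRange 29 33 1).foldl
    (fun s i => if PySem.Int.mod i 2 ≠ 0 then
        s + (if word.toList.getD i.toNat '0' = '1' then 1 else 0) else s) 0
  let p_even := sum1 % 2
  let sum2 : Nat := (PySem.List.pyRange 29 33 1).foldl
    (fun s i => if PySem.Int.mod i 2 = 0 then
        s + (if word.toList.getD i.toNat '0' = '1' then 1 else 0) else s) 0
  let p_odd := sum2 % 2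
  let word2 := muda_bit word 1 p_even
  muda_bit word2 2 p_odd

-- ===== PORT B =====
def codifica_paridade_2msb4_alt (palavra : Int) : String :=
  let v : Nat := (PySem.Int.band palavra 0xffffffff).toNat
  let p_even := ((v >>> 3) ^^^ (v >>> 1)) &&& 1
  let p_odd := ((v >>> 2) ^^^ v) &&& 1
  let r := (v &&& 0x3fffffff) ||| (p_even <<< 31) ||| (p_odd <<< 30)
  fmt33 r

-- ===== PRECONDITION & SPEC =====
def Spec_codifica_paridade_2msb4 (palavra : Int) (out : String) : Prop := out = codifica_paridade_2msb4_alt palavra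
instance (palavra : Int) (out : String) : Decidable (Spec_codifica_paridade_2msb4 palavra out) := by unfold Spec_codifica_paridade_2msb4; infer_instance

-- ===== CLAIM (what is proved, stated in full; the proofs are below) =====
def Claim_equal_codifica_paridade_2msb4 : Prop := ∀ (palavra : Int), Dom_codifica_paridade_2msb4 palavra → Spec_codifica_paridade_2msb4 palavra (codifica_paridade_2msb4 palavra)

-- ===== LEMMAS AND PROOFS =====

-- the masked word is below 2^32 (holds for every Int, Dom not needed)
theorem band_mask_lt (a : Int) : (PySem.Int.band a 0xffffffff).toNat < 2 ^ 32 := by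
  unfold PySem.Int.band
  have hb : ((0xffffffff : Int)).toNat = 4294967295 := by decide
  have h1 : a.toNat &&& ((0xffffffff : Int)).toNat ≤ 4294967295 := by
    rw [hb]; exact Nat.and_le_right
  split_ifs with ha hbb hbb
  · omega
  · norm_num at hbb
  · omega
  · norm_num at hbb

-- B's parity formula equals A's bit sum mod 2
theorem xor_and_one (v a b : Nat) :
    ((v >>> a) ^^^ (v >>> b)) &&& 1
      = ((if v.testBit a then 1 else 0) + (if v.testBit b then 1 else 0)) % 2 := by
  have hx : ∀ x : Nat, x &&& 1 = if x.testBit 0 then 1 else 0 := by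
    intro x
    rw [Nat.and_one_is_mod]
    rcases Nat.mod_two_eq_zero_or_one x with h | h <;> simp [Nat.testBit_zero, h]
  rw [hx]
  rw [Nat.testBit_xor]
  rw [Nat.testBit_shiftRight, Nat.testBit_shiftRight]
  rcases hA : v.testBit a <;> rcases hB : v.testBit b <;> simp

-- bits of B's assembled result
theorem testBit_assembled (v p q j : Nat) (hv : v < 2 ^ 32) (hp : p < 2) (hq : q < 2)
    (hj : j < 33) :
    ((v &&& 0x3fffffff) ||| (p <<< 31) ||| (q <<< 30)).testBit j
      = if j = 31 then decide (p = 1) else if j = 30 then decide (q = 1)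
        else if j = 32 then false else v.testBit j := by
  have hp0 : p.testBit 0 = decide (p = 1) := by interval_cases p <;> decide
  have hq0 : q.testBit 0 = decide (q = 1) := by interval_cases q <;> decide
  have hp1 : p.testBit 1 = false := by interval_cases p <;> decide
  have hq1 : q.testBit 1 = false := by interval_cases q <;> decide
  have hq2 : q.testBit 2 = false := by interval_cases q <;> decide
  have hv32 : v.testBit 32 = false :=
    Nat.testBit_lt_two_pow (lt_of_lt_of_le hv (by norm_num))
  simp only [Nat.testBit_or, Nat.testBit_and, Nat.testBit_shiftLeft,
    show (0x3fffffff : Nat) = 2 ^ 30 - 1 from by norm_num, Nat.testBit_two_pow_sub_one]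
  interval_cases j <;> simp [hp0, hq0, hp1, hq1, hq2, hv32]

-- character at index i of the formatted word
theorem fmt33_get (v i : Nat) (hi : i < 33) :
    (fmt33 v).toList[i]?.getD '0' = if v.testBit (32 - i) then '1' else '0' := by
  simp [fmt33, String.toList_ofList, hi]

theorem core_eq (v : Nat) (hv : v < 2 ^ 32) :
    (let word := fmt33 v
     let sum1 : Nat := (PySem.List.pyRange 29 33 1).foldl
       (fun s i => if PySem.Int.mod i 2 ≠ 0 then
           s + (if word.toList.getD i.toNat '0' = '1' then 1 else 0) else s) 0
     let p_even := sum1 % 2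
     let sum2 : Nat := (PySem.List.pyRange 29 33 1).foldl
       (fun s i => if PySem.Int.mod i 2 = 0 then
           s + (if word.toList.getD i.toNat '0' = '1' then 1 else 0) else s) 0
     let p_odd := sum2 % 2
     muda_bit (muda_bit word 1 p_even) 2 p_odd)
    = fmt33 (((v &&& 0x3fffffff)
        ||| ((((v >>> 3) ^^^ (v >>> 1)) &&& 1) <<< 31))
        ||| ((((v >>> 2) ^^^ v) &&& 1) <<< 30)) := by
  have hx2 : ((v >>> 2) ^^^ v) &&& 1
      = ((if v.testBit 2 then (1 : Nat) else 0) + (if v.testBit 0 then 1 else 0)) % 2 := by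
    simpa using xor_and_one v 2 0
  rw [xor_and_one v 3 1, hx2]
  have hr : PySem.List.pyRange 29 33 1 = [29, 30, 31, 32] := by decide
  have h29 : (fmt33 v).toList[29]?.getD '0' = if v.testBit 3 then '1' else '0' := by
    simpa using fmt33_get v 29 (by norm_num)
  have h30 : (fmt33 v).toList[30]?.getD '0' = if v.testBit 2 then '1' else '0' := by
    simpa using fmt33_get v 30 (by norm_num)
  have h31 : (fmt33 v).toList[31]?.getD '0' = if v.testBit 1 then '1' else '0' := by
    simpa using fmt33_get v 31 (by norm_num)
  have h32 : (fmt33 v).toList[32]?.getD '0' = if v.testBit 0 then '1' else '0' := by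
    simpa using fmt33_get v 32 (by norm_num)
  have hc : ∀ b : Bool, (if (if b then '1' else '0') = '1' then (1 : Nat) else 0)
      = if b then 1 else 0 := by intro b; cases b <;> simp
  simp only [hr, List.foldl, List.getD, show ((29 : Int)).toNat = 29 from rfl,
    show ((30 : Int)).toNat = 30 from rfl, show ((31 : Int)).toNat = 31 from rfl,
    show ((32 : Int)).toNat = 32 from rfl,
    show PySem.Int.mod 29 2 = 1 from by decide, show PySem.Int.mod 30 2 = 0 from by decide,
    show PySem.Int.mod 31 2 = 1 from by decide, show PySem.Int.mod 32 2 = 0 from by decide,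
    h29, h30, h31, h32, hc]
  norm_num
  simp only [muda_bit, fmt33, String.toList_ofList]
  refine congrArg String.ofList ?_
  apply List.ext_getElem
  · simp
  · intro i h1 h2
    have hi : i < 33 := by simpa using h2
    simp only [List.getElem_set, List.getElem_map, List.getElem_range]
    rw [testBit_assembled v _ _ (32 - i) hv (Nat.mod_lt _ (by norm_num))
      (Nat.mod_lt _ (by norm_num)) (by omega)]
    rcases Nat.lt_or_ge i 1 with hlt | hge
    · have : i = 0 := by omega
      subst this
      have hv32 : v.testBit 32 = false :=
        Nat.testBit_lt_two_pow (lt_of_lt_of_le hv (by norm_num))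
      simp [hv32]
    · rcases Nat.lt_or_ge i 2 with hlt2 | hge2
      · have : i = 1 := by omega
        subst this
        simp
      · rcases Nat.lt_or_ge i 3 with hlt3 | hge3
        · have : i = 2 := by omega
          subst this
          simp
        · have e1 : ¬ (1 = i) := by omega
          have e2 : ¬ (2 = i) := by omega
          have e3 : 32 - i ≠ 31 := by omega
          have e4 : 32 - i ≠ 30 := by omega
          have e5 : 32 - i ≠ 32 := by omega
          simp [e1, e2, e3, e4, e5]

-- ===== VERDICT (by name: the statement is the Claim_ definition above) =====
theorem codifica_paridade_2msb4_spec : Claim_equal_codifica_paridade_2msb4 := by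
  intro palavra _
  unfold Spec_codifica_paridade_2msb4 codifica_paridade_2msb4 codifica_paridade_2msb4_alt
  exact core_eq _ (band_mask_lt palavra)
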